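-- pv_equiv track=rewrite | github.com/liuyingxuvka/FlowPilot | simulations/run_meta_checks.py | _reverse_reachable
-- ===== SOURCE A (Python) =====
-- from collections import deque
--
-- def _reverse_reachable(edges: list[list[tuple[str, int]]], starts: set[int]) -> set[int]:
--     reverse: list[list[int]] = [[] for _ in edges]
--     for source, outgoing in enumerate(edges):
--         for _label, target in outgoing:
--             reverse[target].append(source)
--     reachable = set(starts)
--     queue: deque[int] = deque(starts)
--     while queue:
--         target = queue.popleft()
--         for source in reverse[target]:
--             if source not in reachable:
--                 reachable.add(source)
--                 queue.append(source)
--     return reachable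
-- ===== SOURCE B (Python) =====
-- def _reverse_reachable(edges: list[list[tuple[str, int]]], starts: set[int]) -> set[int]:
--     # Fixpoint over a growing worklist: the result list itself is the queue.
--     # A `done` flag array marks expanded nodes; a source is collected as soon
--     # as one of its targets is done, so no reverse adjacency list and no deque
--     # are needed.
--     done = [False] * len(edges)
--     order = list(starts)
--     i = 0
--     while i < len(order):
--         done[order[i]] = True
--         i += 1
--         for source, outgoing in enumerate(edges):
--             if source not in order and any(done[target] for _label, target in outgoing):
--                 order.append(source)
--     return set(order)
-- ===== Notes on version B (the rewrite author's own statement) =====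
-- stated objective: simpler
-- what changed: B drops the reverse adjacency list, the deque and the separate reachable set: the growing result list itself serves as the FIFO worklist, a done flag array marks expanded nodes, and predecessors are found by rescanning the forward edge lists; Pre_ excludes only inputs with a node id outside [-len(edges), len(edges)), on which A raises IndexError.
import Mathlib
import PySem

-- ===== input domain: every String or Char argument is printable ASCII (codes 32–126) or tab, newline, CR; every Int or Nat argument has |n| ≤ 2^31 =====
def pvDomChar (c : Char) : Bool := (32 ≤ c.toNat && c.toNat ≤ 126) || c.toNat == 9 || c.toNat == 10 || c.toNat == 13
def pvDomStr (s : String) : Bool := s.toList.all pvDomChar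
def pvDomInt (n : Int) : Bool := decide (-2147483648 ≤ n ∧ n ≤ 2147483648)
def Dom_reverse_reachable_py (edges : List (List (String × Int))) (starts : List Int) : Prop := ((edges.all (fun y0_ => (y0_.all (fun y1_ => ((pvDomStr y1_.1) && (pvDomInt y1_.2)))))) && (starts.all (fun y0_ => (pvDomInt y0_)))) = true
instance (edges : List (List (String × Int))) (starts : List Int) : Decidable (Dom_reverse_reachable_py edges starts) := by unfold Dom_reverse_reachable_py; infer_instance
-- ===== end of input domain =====

-- B drops the reverse adjacency list, the deque and the separate reachable set: the growing
-- result list itself is the FIFO worklist, a `done` flag array marks expanded nodes, and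
-- predecessors are found by rescanning the forward edge lists (objective: simpler;
-- return value only, A mutates nothing).

-- ===== PORT A =====
-- reverse[target].append(source)  (Python list index: in-range negative wraps, out of range raises — raising inputs are outside Pre_)
def pvRevAdd (rev : List (List Int)) (source target : Int) : List (List Int) :=
  PySem.List.pySetD rev target (PySem.List.pyGetD rev target [] ++ [source])

-- reverse = [[] for _ in edges]; for source, outgoing in enumerate(edges): for _label, target in outgoing: reverse[target].append(source)
def pvBuildRev (edges : List (List (String × Int))) : List (List Int) :=
  (PySem.List.enumerate edges 0).foldl
    (fun rev p => p.2.foldl (fun rev lt => pvRevAdd rev p.1 lt.2) rev)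
    (edges.map (fun _ => ([] : List Int)))

-- if source not in reachable: reachable.add(source); queue.append(source)   (st = (reachable, queue))
def pvBfsStep (st : List Int × List Int) (s : Int) : List Int × List Int :=
  if s ∉ st.1 then (st.1 ++ [s], st.2 ++ [s]) else st

-- while queue: target = queue.popleft(); for source in reverse[target]: …
-- (fuel = len(starts) + len(edges) always suffices: every queue entry is a start or a fresh source index)
def pvBfs (rev : List (List Int)) : Nat → List Int → List Int → List Int
  | 0, reach, _ => reach
  | fuel + 1, reach, queue =>
    match queue with
    | [] => reach
    | t :: rest =>
      let st := (PySem.List.pyGetD rev t []).foldl pvBfsStep (reach, rest)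
      pvBfs rev fuel st.1 st.2

def reverse_reachable_py (edges : List (List (String × Int))) (starts : List Int) : List Int :=
  pvBfs (pvBuildRev edges) (starts.length + edges.length) (PySem.Set.ofList starts) starts

-- ===== PORT B =====
-- if source not in order and any(done[target] for _label, target in outgoing): order.append(source)
-- (done[target]: Python list index — in-range negative wraps, out of range raises; raising inputs are outside Pre_)
def pvScanStepB (done : List Bool) (ord : List Int) (p : Int × List (String × Int)) : List Int :=
  if p.1 ∉ ord ∧ p.2.any (fun lt => PySem.List.pyGetD done lt.2 false) then ord ++ [p.1] else ord

-- while i < len(order): done[order[i]] = True; i += 1; for source, outgoing in enumerate(edges): …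
-- (fuel = len(starts) + len(edges) always suffices: order only ever gains fresh source indices)
def pvLoopB (edges : List (List (String × Int))) : Nat → List Int → Nat → List Bool → List Int
  | 0, order, _, _ => order
  | fuel + 1, order, i, done =>
    if h : i < order.length then
      let done' := PySem.List.pySetD done order[i] true
      pvLoopB edges fuel ((PySem.List.enumerate edges 0).foldl (pvScanStepB done') order) (i + 1) done'
    else order

def reverse_reachable_py_alt (edges : List (List (String × Int))) (starts : List Int) : List Int :=
  PySem.Set.ofList (pvLoopB edges (starts.length + edges.length) starts 0 (edges.map (fun _ => false)))

-- ===== PRECONDITION & SPEC =====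
-- Pre_ admits exactly the inputs A returns on: every edge target and every start lies in
-- [-len(edges), len(edges)); outside, A raises IndexError indexing the reverse adjacency list.
def Pre_reverse_reachable_py (edges : List (List (String × Int))) (starts : List Int) : Prop :=
  (∀ out ∈ edges, ∀ lt ∈ out, -(edges.length : Int) ≤ lt.2 ∧ lt.2 < (edges.length : Int)) ∧
  (∀ s ∈ starts, -(edges.length : Int) ≤ s ∧ s < (edges.length : Int))
instance (edges : List (List (String × Int))) (starts : List Int) : Decidable (Pre_reverse_reachable_py edges starts) := by unfold Pre_reverse_reachable_py; infer_instance

def pvWitness_reverse_reachable_py : (List (List (String × Int))) × List Int := ([[("a", 0)], [("b", 0)]], [0])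

def Spec_reverse_reachable_py (edges : List (List (String × Int))) (starts : List Int) (out : List Int) : Prop := out = reverse_reachable_py_alt edges starts
instance (edges : List (List (String × Int))) (starts : List Int) (out : List Int) : Decidable (Spec_reverse_reachable_py edges starts out) := by unfold Spec_reverse_reachable_py; infer_instance

-- ===== CLAIM (what is proved, stated in full; the proofs are below) =====
def Claim_equal_reverse_reachable_py : Prop := ∀ (edges : List (List (String × Int))) (starts : List Int), Dom_reverse_reachable_py edges starts → Pre_reverse_reachable_py edges starts → Spec_reverse_reachable_py edges starts (reverse_reachable_py edges starts)

-- ===== LEMMAS AND PROOFS =====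

-- the predecessor multiset of node x, in the order A's reverse[x % n] lists it
def pvPreds (edges : List (List (String × Int))) (x : Int) : List Int :=
  (PySem.List.enumerate edges 0).flatMap
    (fun p => (p.2.filter (fun lt => lt.2 % (edges.length : Int) == x % (edges.length : Int))).map (fun _ => p.1))

-- proof-only abstraction of B's inner scan, with the membership test made a pure predicate
def pvScanF (f : String × Int → Bool) (ord : List Int) (p : Int × List (String × Int)) : List Int :=
  if p.1 ∉ ord ∧ p.2.any f then ord ++ [p.1] else ord

theorem pv_pyIdx_emod (n : Nat) (i : Int) (h1 : -(n : Int) ≤ i) (h2 : i < (n : Int)) :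
    PySem.List.pyIdx? n i = some (i % (n : Int)).toNat := by
  unfold PySem.List.pyIdx?
  by_cases ha : 0 ≤ i
  · have he : i % (n : Int) = i := Int.emod_eq_of_lt ha h2
    rw [if_pos ha, if_pos h2, he]
  · have hn : 0 < n := by omega
    have he : i % (n : Int) = i + n := by
      have h5 : (i + (n : Int) * 1) % (n : Int) = i % (n : Int) := Int.add_mul_emod_self_left i (n : Int) 1
      rw [show i + (n : Int) * 1 = i + n by ring] at h5
      rw [← h5, Int.emod_eq_of_lt (by omega) (by omega)]
    rw [if_neg ha, if_pos h1, he]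
    congr 1
    omega

theorem pv_getD_emod {α : Type} (xs : List α) (n : Nat) (hl : xs.length = n) (i : Int) (d : α)
    (h1 : -(n : Int) ≤ i) (h2 : i < (n : Int)) :
    PySem.List.pyGetD xs i d = xs.getD (i % (n : Int)).toNat d := by
  unfold PySem.List.pyGetD PySem.List.pyGet?
  rw [hl, pv_pyIdx_emod n i h1 h2]
  simp [List.getD]

theorem pv_setD_emod {α : Type} (xs : List α) (n : Nat) (hl : xs.length = n) (i : Int) (v : α)
    (h1 : -(n : Int) ≤ i) (h2 : i < (n : Int)) :
    PySem.List.pySetD xs i v = xs.set (i % (n : Int)).toNat v := by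
  unfold PySem.List.pySetD PySem.List.pySet?
  rw [hl, pv_pyIdx_emod n i h1 h2]
  simp

theorem pv_revAdd_get (rev : List (List Int)) (n : Nat) (hl : rev.length = n) (s t u : Int)
    (ht0 : -(n : Int) ≤ t) (htn : t < (n : Int))
    (hu0 : 0 ≤ u) (hun : u < (n : Int)) :
    PySem.List.pyGetD (pvRevAdd rev s t) u []
      = if u = t % (n : Int) then PySem.List.pyGetD rev u [] ++ [s]
        else PySem.List.pyGetD rev u [] := by
  unfold pvRevAdd
  have hnz : (n : Int) ≠ 0 := by omega
  have hm0 : 0 ≤ t % (n : Int) := Int.emod_nonneg t hnz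
  have hmn : t % (n : Int) < (n : Int) := Int.emod_lt_of_pos t (by omega)
  have hue : u % (n : Int) = u := Int.emod_eq_of_lt hu0 hun
  rw [pv_setD_emod rev n hl t _ ht0 htn,
      pv_getD_emod rev n hl t ([] : List Int) ht0 htn,
      pv_getD_emod rev n hl u ([] : List Int) (by omega) hun,
      pv_getD_emod _ n (by simpa using hl) u ([] : List Int) (by omega) hun, hue]
  by_cases h : u = t % (n : Int)
  · rw [if_pos h, h]
    have hlt : (t % (n : Int)).toNat < rev.length := by omega
    simp [List.getD, hlt]
  · rw [if_neg h]
    have hne : (t % (n : Int)).toNat ≠ u.toNat := by omega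
    simp [List.getD, List.getElem?_set_ne hne]

theorem pv_mem_enumerate_snd (edges : List (List (String × Int))) (p : Int × List (String × Int))
    (hp : p ∈ PySem.List.enumerate edges 0) : p.2 ∈ edges := by
  rw [PySem.List.enumerate_eq_map_pyRange edges ([] : List (String × Int))] at hp
  obtain ⟨j, hj, rfl⟩ := List.mem_map.1 hp
  have hj' := (PySem.List.mem_pyRange_one).1 hj
  simp only [PySem.List.len] at hj'
  have h : PySem.List.pyGetD edges j [] = edges[j.toNat] := by
    apply PySem.List.pyGetD_eq_getElem <;> omega
  simp only [h]
  exact List.getElem_mem _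

theorem pv_inner (n : Nat) (s : Int) : ∀ (out : List (String × Int)) (rev : List (List Int)),
    rev.length = n → (∀ lt ∈ out, -(n : Int) ≤ lt.2 ∧ lt.2 < (n : Int)) →
    (out.foldl (fun rev lt => pvRevAdd rev s lt.2) rev).length = n ∧
    (∀ t : Int, 0 ≤ t → t < (n : Int) →
      PySem.List.pyGetD (out.foldl (fun rev lt => pvRevAdd rev s lt.2) rev) t []
        = PySem.List.pyGetD rev t []
          ++ (out.filter (fun lt => lt.2 % (n : Int) == t)).map (fun _ => s))
  | [], rev, hlen, _ => ⟨hlen, fun t _ _ => by simp⟩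
  | lt :: out, rev, hlen, hb => by
    have hbd := hb lt (List.mem_cons_self)
    have hlen' : (pvRevAdd rev s lt.2).length = n := by
      unfold pvRevAdd; rw [PySem.List.length_pySetD]; exact hlen
    obtain ⟨hl, hc⟩ := pv_inner n s out (pvRevAdd rev s lt.2) hlen'
      (fun x hx => hb x (List.mem_cons_of_mem _ hx))
    refine ⟨by simpa using hl, fun t ht0 htn => ?_⟩
    have hstep := pv_revAdd_get rev n hlen s lt.2 t (by omega) (by omega) ht0 htn
    simp only [List.foldl_cons]
    rw [hc t ht0 htn, hstep]
    by_cases h : t = lt.2 % (n : Int)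
    · rw [if_pos h, List.filter_cons, if_pos (by simpa using h.symm)]
      simp
    · rw [if_neg h, List.filter_cons, if_neg (by simpa using fun hh => h hh.symm)]

theorem pv_buildGen (n : Nat) : ∀ (L : List (Int × List (String × Int))) (rev : List (List Int)),
    rev.length = n → (∀ p ∈ L, ∀ lt ∈ p.2, -(n : Int) ≤ lt.2 ∧ lt.2 < (n : Int)) →
    (L.foldl (fun rev p => p.2.foldl (fun rev lt => pvRevAdd rev p.1 lt.2) rev) rev).length = n ∧
    (∀ t : Int, 0 ≤ t → t < (n : Int) →
      PySem.List.pyGetD (L.foldl (fun rev p => p.2.foldl (fun rev lt => pvRevAdd rev p.1 lt.2) rev) rev) t []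
        = PySem.List.pyGetD rev t []
          ++ L.flatMap (fun p => (p.2.filter (fun lt => lt.2 % (n : Int) == t)).map (fun _ => p.1)))
  | [], rev, hlen, _ => ⟨hlen, fun t _ _ => by simp⟩
  | p :: L, rev, hlen, hb => by
    obtain ⟨hl, hc⟩ := pv_inner n p.1 p.2 rev hlen (hb p List.mem_cons_self)
    obtain ⟨hL, ihc⟩ := pv_buildGen n L _ hl (fun q hq => hb q (List.mem_cons_of_mem _ hq))
    refine ⟨by simpa using hL, fun t ht0 htn => ?_⟩
    simp only [List.foldl_cons, List.flatMap_cons]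
    rw [ihc t ht0 htn, hc t ht0 htn, List.append_assoc]

theorem pv_ofList_append (l : List Int) (a : Int) (h : a ∉ l) :
    PySem.Set.ofList (l ++ [a]) = PySem.Set.ofList l ++ [a] := by
  rw [PySem.Set.ofList_eq_foldl, PySem.Set.ofList_eq_foldl, List.foldl_append]
  simp only [List.foldl_cons, List.foldl_nil]
  have : a ∉ List.foldl PySem.Set.add [] l := by
    rw [← PySem.Set.ofList_eq_foldl]
    simpa [PySem.Set.mem_ofList] using h
  simp [PySem.Set.add, this, PySem.Set.contains]

theorem pv_bfsStep_stay (s : Int) : ∀ (c : Nat) (st : List Int × List Int), s ∈ st.1 →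
    (List.replicate c s).foldl pvBfsStep st = st
  | 0, st, _ => rfl
  | c + 1, st, h => by
    simp only [List.replicate_succ, List.foldl_cons]
    rw [show pvBfsStep st s = st by simp [pvBfsStep, h]]
    exact pv_bfsStep_stay s c st h

theorem pv_bfsStep_replicate (s : Int) (c : Nat) (reach rest : List Int) :
    (List.replicate c s).foldl pvBfsStep (reach, rest)
      = if s ∈ reach ∨ c = 0 then (reach, rest) else (reach ++ [s], rest ++ [s]) := by
  by_cases h : s ∈ reach ∨ c = 0
  · rw [if_pos h]
    rcases h with h | rfl
    · exact pv_bfsStep_stay s c _ h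
    · rfl
  · push_neg at h
    obtain ⟨h1, h2⟩ := h
    rw [if_neg (by simp [h1, h2])]
    obtain ⟨c', rfl⟩ : ∃ c', c = c' + 1 := ⟨c - 1, by omega⟩
    simp only [List.replicate_succ, List.foldl_cons]
    rw [show pvBfsStep (reach, rest) s = (reach ++ [s], rest ++ [s]) by simp [pvBfsStep, h1]]
    exact pv_bfsStep_stay s c' _ (by simp)

theorem pv_mem_enumerate_fst {α : Type} (xs : List α) (d : α) (p : Int × α)
    (hp : p ∈ PySem.List.enumerate xs 0) : 0 ≤ p.1 ∧ p.1 < (xs.length : Int) := by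
  rw [PySem.List.enumerate_eq_map_pyRange xs d] at hp
  obtain ⟨j, hj, rfl⟩ := List.mem_map.1 hp
  have hj' := (PySem.List.mem_pyRange_one).1 hj
  simpa [PySem.List.len] using hj'

theorem pv_build_char (edges : List (List (String × Int)))
    (hpre : ∀ out ∈ edges, ∀ lt ∈ out, -(edges.length : Int) ≤ lt.2 ∧ lt.2 < (edges.length : Int))
    (x : Int) (hx0 : -(edges.length : Int) ≤ x) (hxn : x < (edges.length : Int)) :
    PySem.List.pyGetD (pvBuildRev edges) x [] = pvPreds edges x := by
  have hn : 0 < edges.length := by omega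
  have h0 : (edges.map (fun _ => ([] : List Int))).length = edges.length := by simp
  obtain ⟨hblen, hbchar⟩ := pv_buildGen edges.length (PySem.List.enumerate edges 0)
    (edges.map (fun _ => ([] : List Int))) h0
    (fun p hp => hpre p.2 (pv_mem_enumerate_snd edges p hp))
  have hm0 : 0 ≤ x % (edges.length : Int) := Int.emod_nonneg x (by omega)
  have hmn : x % (edges.length : Int) < (edges.length : Int) := Int.emod_lt_of_pos x (by omega)
  have hee : x % (edges.length : Int) % (edges.length : Int) = x % (edges.length : Int) :=
    Int.emod_emod_of_dvd x (dvd_refl _)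
  have hwrap : PySem.List.pyGetD (pvBuildRev edges) x []
      = PySem.List.pyGetD (pvBuildRev edges) (x % (edges.length : Int)) [] := by
    unfold pvBuildRev
    rw [pv_getD_emod _ edges.length hblen x ([] : List Int) hx0 hxn,
        pv_getD_emod _ edges.length hblen _ ([] : List Int) (by omega) (by omega), hee]
  rw [hwrap]
  unfold pvBuildRev
  rw [hbchar (x % (edges.length : Int)) hm0 hmn]
  have hinit : PySem.List.pyGetD (edges.map (fun _ => ([] : List Int))) (x % (edges.length : Int)) [] = ([] : List Int) := by
    rw [PySem.List.pyGetD_eq_getElem _ _ hm0 (by simpa using hmn)]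
    simp
  rw [hinit, List.nil_append]
  unfold pvPreds
  rfl

theorem pv_scan_prefix (f : String × Int → Bool) : ∀ (L : List (Int × List (String × Int))) (order : List Int),
    order <+: L.foldl (pvScanF f) order
  | [], order => List.prefix_refl order
  | p :: L, order => by
    simp only [List.foldl_cons]
    refine List.IsPrefix.trans ?_ (pv_scan_prefix f L _)
    unfold pvScanF
    split
    · exact ⟨[p.1], rfl⟩
    · exact List.prefix_refl order

theorem pv_scan_mem (f : String × Int → Bool) : ∀ (L : List (Int × List (String × Int))) (order : List Int)
    (y : Int), y ∈ L.foldl (pvScanF f) order → y ∈ order ∨ ∃ p ∈ L, y = p.1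
  | [], order, y, hy => Or.inl hy
  | p :: L, order, y, hy => by
    simp only [List.foldl_cons] at hy
    rcases pv_scan_mem f L _ y hy with h | ⟨q, hq, rfl⟩
    · unfold pvScanF at h
      split at h
      · rcases List.mem_append.1 h with h | h
        · exact Or.inl h
        · exact Or.inr ⟨p, List.mem_cons_self, by simpa using h⟩
      · exact Or.inl h
    · exact Or.inr ⟨q, List.mem_cons_of_mem _ hq, rfl⟩

theorem pv_scan_complete (f : String × Int → Bool) : ∀ (L : List (Int × List (String × Int))) (order : List Int)
    (p : Int × List (String × Int)), p ∈ L → p.1 ∈ L.foldl (pvScanF f) order ∨ p.2.any f = false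
  | [], _, _, hp => absurd hp (List.not_mem_nil)
  | q :: L, order, p, hp => by
    simp only [List.foldl_cons]
    rcases List.mem_cons.1 hp with rfl | hp'
    · by_cases hc : p.1 ∉ order ∧ p.2.any f
      · left
        have h1 : p.1 ∈ pvScanF f order p := by
          unfold pvScanF; rw [if_pos hc]; simp
        exact (pv_scan_prefix f L (pvScanF f order p)).subset h1
      · by_cases hm : p.1 ∈ order
        · left
          have h1 : p.1 ∈ pvScanF f order p := by
            unfold pvScanF; split <;> simp [hm]
          exact (pv_scan_prefix f L (pvScanF f order p)).subset h1
        · right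
          by_cases ha : p.2.any f
          · exact absurd ⟨hm, ha⟩ hc
          · simpa using ha
    · exact pv_scan_complete f L _ p hp'

theorem pv_scan_bisim (f : String × Int → Bool) : ∀ (L : List (Int × List (String × Int))) (order rest : List Int),
    (L.flatMap (fun p => (p.2.filter f).map (fun _ => p.1))).foldl pvBfsStep
      (PySem.Set.ofList order, rest)
      = (PySem.Set.ofList (L.foldl (pvScanF f) order),
         rest ++ (L.foldl (pvScanF f) order).drop order.length)
  | [], order, rest => by simp
  | p :: L, order, rest => by
    simp only [List.flatMap_cons, List.foldl_append, List.foldl_cons]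
    have hmap : ((p.2.filter f).map (fun _ => p.1))
        = List.replicate ((p.2.filter f).length) p.1 := by
      simp [List.map_const']
    rw [hmap, pv_bfsStep_replicate]
    by_cases hg : p.1 ∉ order ∧ p.2.any f
    · have hc : (p.2.filter f).length ≠ 0 := by
        obtain ⟨lt, hlt, hx⟩ := List.any_eq_true.1 hg.2
        have hym : lt ∈ p.2.filter f := List.mem_filter.2 ⟨hlt, hx⟩
        intro h0; rw [List.length_eq_zero_iff] at h0; simp [h0] at hym
      rw [if_neg (by
        push_neg
        exact ⟨by simpa [PySem.Set.mem_ofList] using hg.1, hc⟩)]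
      rw [← pv_ofList_append order p.1 hg.1,
          show pvScanF f order p = order ++ [p.1] from if_pos hg,
          pv_scan_bisim f L (order ++ [p.1]) (rest ++ [p.1])]
      obtain ⟨z, hz⟩ := pv_scan_prefix f L (order ++ [p.1])
      rw [← hz]
      congr 1
      rw [List.drop_left, List.append_assoc order [p.1] z, List.drop_left]
      simp
    · rw [if_pos ?_, show pvScanF f order p = order from if_neg hg]
      · exact pv_scan_bisim f L order rest
      · by_cases hm : p.1 ∈ order
        · exact Or.inl (by simpa [PySem.Set.mem_ofList] using hm)
        · right
          have hx : ¬ p.2.any f := fun h => hg ⟨hm, h⟩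
          rw [List.length_eq_zero_iff, List.filter_eq_nil_iff]
          intro y hy hgy
          exact hx (List.any_eq_true.2 ⟨y, hy, hgy⟩)

theorem pv_any_congr {α : Type} (f g : α → Bool) : ∀ (l : List α), (∀ a ∈ l, f a = g a) → l.any f = l.any g
  | [], _ => rfl
  | a :: l, h => by
    simp only [List.any_cons]
    rw [h a List.mem_cons_self, pv_any_congr f g l (fun b hb => h b (List.mem_cons_of_mem _ hb))]

-- with the done array characterised and the invariant that no unseen source has an already-expanded
-- target, B's inner scan over done[] is the pure wrap-match scan
theorem pv_scanB_to_F (edges : List (List (String × Int)))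
    (hpre : ∀ out ∈ edges, ∀ lt ∈ out, -(edges.length : Int) ≤ lt.2 ∧ lt.2 < (edges.length : Int))
    (done' : List Bool) (order : List Int) (i : Nat) (x : Int)
    (hchar : ∀ u : Int, 0 ≤ u → u < (edges.length : Int) →
      done'.getD u.toNat false = ((order.take i ++ [x]).any (fun y => y % (edges.length : Int) == u)))
    (hdl : done'.length = edges.length)
    (hinv : ∀ p ∈ PySem.List.enumerate edges 0, p.1 ∉ order → ∀ lt ∈ p.2, ∀ y ∈ order.take i,
      ¬ (y % (edges.length : Int) = lt.2 % (edges.length : Int))) :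
    ∀ (L : List (Int × List (String × Int))), (∀ p ∈ L, p ∈ PySem.List.enumerate edges 0) →
    ∀ (ord : List Int), (∀ s ∈ order, s ∈ ord) →
    L.foldl (pvScanStepB done') ord
      = L.foldl (pvScanF (fun lt => lt.2 % (edges.length : Int) == x % (edges.length : Int))) ord
  | [], _, ord, _ => rfl
  | p :: L, hL, ord, hsub => by
    have hp := hL p List.mem_cons_self
    have hstep : pvScanStepB done' ord p
        = pvScanF (fun lt => lt.2 % (edges.length : Int) == x % (edges.length : Int)) ord p := by
      unfold pvScanStepB pvScanF
      by_cases hm : p.1 ∈ ord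
      · rw [if_neg (by simp [hm]), if_neg (by simp [hm])]
      · have hnp : p.1 ∉ order := fun h => hm (hsub p.1 h)
        have hany : p.2.any (fun lt => PySem.List.pyGetD done' lt.2 false)
            = p.2.any (fun lt => lt.2 % (edges.length : Int) == x % (edges.length : Int)) := by
          refine pv_any_congr _ _ p.2 (fun lt hlt => ?_)
          have hb := hpre p.2 (pv_mem_enumerate_snd edges p hp) lt hlt
          have hn : 0 < edges.length := by omega
          have hm0 : 0 ≤ lt.2 % (edges.length : Int) := Int.emod_nonneg lt.2 (by omega)
          have hmn : lt.2 % (edges.length : Int) < (edges.length : Int) := Int.emod_lt_of_pos lt.2 (by omega)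
          rw [pv_getD_emod done' edges.length hdl lt.2 false hb.1 hb.2,
              hchar (lt.2 % (edges.length : Int)) hm0 hmn, List.any_append]
          have hold : (order.take i).any (fun y => y % (edges.length : Int) == lt.2 % (edges.length : Int)) = false := by
            rw [List.any_eq_false]
            intro y hy
            simpa using hinv p hp hnp lt hlt y hy
          rw [hold, Bool.false_or, List.any_cons, List.any_nil, Bool.or_false]
          have : (x % (edges.length : Int) == lt.2 % (edges.length : Int))
              = (lt.2 % (edges.length : Int) == x % (edges.length : Int)) := by
            by_cases h : x % (edges.length : Int) = lt.2 % (edges.length : Int)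
            · simp [h]
            · simp [h, Ne.symm h]
          rw [this]
        rw [hany]
    rw [List.foldl_cons, List.foldl_cons, hstep]
    refine pv_scanB_to_F edges hpre done' order i x hchar hdl hinv L
      (fun q hq => hL q (List.mem_cons_of_mem _ hq)) _ (fun s hs => ?_)
    unfold pvScanF
    split
    · exact List.mem_append_left _ (hsub s hs)
    · exact hsub s hs

theorem pv_loop_bisim (edges : List (List (String × Int)))
    (hpre : ∀ out ∈ edges, ∀ lt ∈ out, -(edges.length : Int) ≤ lt.2 ∧ lt.2 < (edges.length : Int)) :
    ∀ (fuel : Nat) (order : List Int) (i : Nat) (done : List Bool),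
      (∀ y ∈ order, -(edges.length : Int) ≤ y ∧ y < (edges.length : Int)) →
      done.length = edges.length →
      (∀ u : Int, 0 ≤ u → u < (edges.length : Int) →
        done.getD u.toNat false = ((order.take i).any (fun y => y % (edges.length : Int) == u))) →
      (∀ p ∈ PySem.List.enumerate edges 0, p.1 ∉ order → ∀ lt ∈ p.2, ∀ y ∈ order.take i,
        ¬ (y % (edges.length : Int) = lt.2 % (edges.length : Int))) →
      pvBfs (pvBuildRev edges) fuel (PySem.Set.ofList order) (order.drop i)
        = PySem.Set.ofList (pvLoopB edges fuel order i done)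
  | 0, order, i, done, _, _, _, _ => rfl
  | fuel + 1, order, i, done, hb, hdl, hdc, hinv => by
    by_cases h : i < order.length
    · have hx := hb order[i] (List.getElem_mem h)
      have hn : 0 < edges.length := by omega
      have hxm0 : 0 ≤ order[i] % (edges.length : Int) := Int.emod_nonneg _ (by omega)
      have hxmn : order[i] % (edges.length : Int) < (edges.length : Int) := Int.emod_lt_of_pos _ (by omega)
      have htake : order.take (i + 1) = order.take i ++ [order[i]] := by
        rw [List.take_add_one, List.getElem?_eq_getElem h]
        rfl
      -- the updated done array
      have hset : PySem.List.pySetD done order[i] true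
          = done.set (order[i] % (edges.length : Int)).toNat true :=
        pv_setD_emod done edges.length hdl order[i] true hx.1 hx.2
      have hdl' : (PySem.List.pySetD done order[i] true).length = edges.length := by
        rw [hset]; simpa using hdl
      have hchar' : ∀ u : Int, 0 ≤ u → u < (edges.length : Int) →
          (PySem.List.pySetD done order[i] true).getD u.toNat false
            = ((order.take i ++ [order[i]]).any (fun y => y % (edges.length : Int) == u)) := by
        intro u hu0 hun
        rw [hset, List.any_append, List.any_cons, List.any_nil, Bool.or_false]
        by_cases hu : u = order[i] % (edges.length : Int)
        · have hidx : (order[i] % (edges.length : Int)).toNat < done.length := by omega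
          have hgd : (done.set (order[i] % (edges.length : Int)).toNat true).getD u.toNat false = true := by
            rw [hu]; simp [List.getD, hidx]
          rw [hgd]
          have hxx : (order[i] % (edges.length : Int) == u) = true := by
            simpa using hu.symm
          rw [hxx, Bool.or_true]
        · have hne : (order[i] % (edges.length : Int)).toNat ≠ u.toNat := by omega
          have hgd : (done.set (order[i] % (edges.length : Int)).toNat true).getD u.toNat false
              = done.getD u.toNat false := by
            simp [List.getD, List.getElem?_set_ne hne]
          rw [hgd, hdc u hu0 hun]
          have hxx : (order[i] % (edges.length : Int) == u) = false := by
            simpa using fun hh => hu hh.symm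
          rw [hxx, Bool.or_false]
      -- the two scans agree
      set f : String × Int → Bool :=
        fun lt => lt.2 % (edges.length : Int) == order[i] % (edges.length : Int) with hf
      have hscan : (PySem.List.enumerate edges 0).foldl (pvScanStepB (PySem.List.pySetD done order[i] true)) order
          = (PySem.List.enumerate edges 0).foldl (pvScanF f) order :=
        pv_scanB_to_F edges hpre _ order i order[i] hchar' hdl' hinv
          (PySem.List.enumerate edges 0) (fun _ hq => hq) order (fun _ hs => hs)
      have hdrop : order.drop i = order[i] :: order.drop (i + 1) := List.drop_eq_getElem_cons h
      rw [hdrop]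
      show pvBfs (pvBuildRev edges) (fuel + 1) (PySem.Set.ofList order) (order[i] :: order.drop (i+1)) = _
      rw [pvLoopB, dif_pos h]
      simp only [pvBfs]
      rw [pv_build_char edges hpre order[i] hx.1 hx.2]
      have hpf : pvPreds edges order[i]
          = (PySem.List.enumerate edges 0).flatMap (fun p => (p.2.filter f).map (fun _ => p.1)) := rfl
      rw [hpf, pv_scan_bisim f (PySem.List.enumerate edges 0) order (order.drop (i + 1))]
      obtain ⟨z, hz⟩ := pv_scan_prefix f (PySem.List.enumerate edges 0) order
      have hsnd : order.drop (i + 1) ++ (List.foldl (pvScanF f) order (PySem.List.enumerate edges 0)).drop order.length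
          = (List.foldl (pvScanF f) order (PySem.List.enumerate edges 0)).drop (i + 1) := by
        rw [← hz, List.drop_left, List.drop_append_of_le_length (by omega)]
      rw [hscan, hsnd]
      -- properties of the new order
      set order' := List.foldl (pvScanF f) order (PySem.List.enumerate edges 0) with ho'
      have hpre' : order <+: order' := pv_scan_prefix f _ order
      have htake' : order'.take (i + 1) = order.take (i + 1) := by
        obtain ⟨z', hz'⟩ := hpre'
        rw [← hz', List.take_append_of_le_length (by omega)]
      have hb' : ∀ y ∈ order', -(edges.length : Int) ≤ y ∧ y < (edges.length : Int) := by
        intro y hy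
        rcases pv_scan_mem f _ _ y hy with hm | ⟨p, hp, rfl⟩
        · exact hb y hm
        · have := pv_mem_enumerate_fst edges ([] : List (String × Int)) p hp
          omega
      have hdc' : ∀ u : Int, 0 ≤ u → u < (edges.length : Int) →
          (PySem.List.pySetD done order[i] true).getD u.toNat false
            = ((order'.take (i + 1)).any (fun y => y % (edges.length : Int) == u)) := by
        intro u hu0 hun
        rw [htake', htake]
        exact hchar' u hu0 hun
      have hinv' : ∀ p ∈ PySem.List.enumerate edges 0, p.1 ∉ order' → ∀ lt ∈ p.2, ∀ y ∈ order'.take (i + 1),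
          ¬ (y % (edges.length : Int) = lt.2 % (edges.length : Int)) := by
        intro p hp hnp lt hlt y hy
        have hnp0 : p.1 ∉ order := fun hmem => hnp (hpre'.subset hmem)
        rw [htake', htake] at hy
        rcases List.mem_append.1 hy with hy' | hy'
        · exact hinv p hp hnp0 lt hlt y hy'
        · have hyx : y = order[i] := by simpa using hy'
          subst hyx
          intro heq
          rcases pv_scan_complete f (PySem.List.enumerate edges 0) order p hp with hin | hno
          · exact hnp hin
          · have hflt : f lt = true := by
              simp only [hf]
              simpa using heq.symm
            have hpa : p.2.any f = true := List.any_eq_true.2 ⟨lt, hlt, hflt⟩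
            rw [hno] at hpa
            exact absurd hpa (by simp)
      exact pv_loop_bisim edges hpre fuel order' (i + 1) _ hb' hdl' hdc' hinv'
    · have hdrop : order.drop i = [] := List.drop_eq_nil_of_le (by omega)
      rw [hdrop, pvLoopB, dif_neg h]
      simp [pvBfs]

-- ===== VERDICT (by name: the statement is the Claim_ definition above) =====
theorem reverse_reachable_py_spec : Claim_equal_reverse_reachable_py := by
  intro edges starts _hdom hpre
  unfold Spec_reverse_reachable_py reverse_reachable_py reverse_reachable_py_alt
  have hdl : (edges.map (fun _ => false)).length = edges.length := by simp
  have h := pv_loop_bisim edges hpre.1 (starts.length + edges.length) starts 0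
    (edges.map (fun _ => false)) (fun y hy => hpre.2 y hy) hdl
    (by
      intro u hu0 hun
      have hidx : u.toNat < edges.length := by omega
      simp [List.getD])
    (by intro p _ _ lt _ y hy; simp at hy)
  simpa using h
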